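-- pv_equiv track=rewrite | github.com/Anurag300705/Python-Lab-3rdSem | PCA1/highervalue.py | super_name
-- ===== SOURCE A (Python) =====
-- def super_name(name1, name2):
--
--     if len(name1)==len(name2):
--         sum1 = sum(ord(char) for char in name1)
--         sum2 = sum(ord(char) for char in name2)
--
--         if sum1 > sum2:
--             return name1
--         elif sum2 > sum1:
--             return name2
--         else:
--             return "Both names have equal ASCII value sums"
--     else:
--         return "Names should have same length"
-- ===== SOURCE B (Python) =====
-- def super_name(name1, name2):
--     if len(name1) != len(name2):
--         return "Names should have same length"
--     # signed character-frequency table: +1 per occurrence in name1, -1 per occurrence in name2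
--     delta = {}
--     for c in name1:
--         delta[c] = delta.get(c, 0) + 1
--     for c in name2:
--         delta[c] = delta.get(c, 0) - 1
--     diff = sum(ord(c) * k for c, k in delta.items())
--     if diff > 0:
--         return name1
--     if diff < 0:
--         return name2
--     return "Both names have equal ASCII value sums"
-- ===== Notes on version B (the rewrite author's own statement) =====
-- stated objective: alternative
-- what changed: B builds a signed character-frequency dictionary (+1 for name1, -1 for name2) and compares via the ord-weighted sum over distinct characters, instead of A's two direct per-string ASCII sums.
import Mathlib
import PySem

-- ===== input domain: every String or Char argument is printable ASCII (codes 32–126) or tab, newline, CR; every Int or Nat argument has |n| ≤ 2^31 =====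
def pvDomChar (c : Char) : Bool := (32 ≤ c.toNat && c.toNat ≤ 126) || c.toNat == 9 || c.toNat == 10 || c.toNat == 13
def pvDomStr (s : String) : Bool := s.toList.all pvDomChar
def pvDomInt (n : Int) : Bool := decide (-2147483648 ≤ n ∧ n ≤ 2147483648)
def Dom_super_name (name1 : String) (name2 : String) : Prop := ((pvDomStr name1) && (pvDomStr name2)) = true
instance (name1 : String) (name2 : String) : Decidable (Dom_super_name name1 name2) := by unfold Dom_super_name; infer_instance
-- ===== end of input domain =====

-- B replaces A's two direct per-string ASCII sums with a signed character-frequency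
-- dictionary (+1 / -1 per occurrence) whose ord-weighted sum over distinct characters
-- decides the comparison (alternative algorithm, same cost).


-- ===== PORT A =====
-- sum(ord(char) for char in s)
def pvAsciiSum (s : List Char) : Int :=
  s.foldl (fun acc c => acc + (c.toNat : Int)) 0

def super_name (name1 : String) (name2 : String) : String :=
  if PySem.Str.len name1 = PySem.Str.len name2 then
    let sum1 := pvAsciiSum name1.toList
    let sum2 := pvAsciiSum name2.toList
    if sum1 > sum2 then name1
    else if sum2 > sum1 then name2
    else "Both names have equal ASCII value sums"
  else "Names should have same length"

-- ===== PORT B =====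
def super_name_alt (name1 : String) (name2 : String) : String :=
  if PySem.Str.len name1 ≠ PySem.Str.len name2 then
    "Names should have same length"
  else
    -- delta[c] = delta.get(c, 0) ± 1
    let d1 := name1.toList.foldl (fun d c => d.insert c (d.getD c 0 + 1))
      (PySem.Dict.empty (κ := Char) (ν := Int))
    let d2 := name2.toList.foldl (fun d c => d.insert c (d.getD c 0 - 1)) d1
    -- sum(ord(c) * k for c, k in delta.items())
    let diff := (d2.items.map (fun p => (p.1.toNat : Int) * p.2)).sum
    if diff > 0 then name1
    else if diff < 0 then name2
    else "Both names have equal ASCII value sums"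

-- ===== PRECONDITION & SPEC =====
def Spec_super_name (name1 : String) (name2 : String) (out : String) : Prop := out = super_name_alt name1 name2
instance (name1 : String) (name2 : String) (out : String) : Decidable (Spec_super_name name1 name2 out) := by unfold Spec_super_name; infer_instance

-- ===== CLAIM (what is proved, stated in full; the proofs are below) =====
def Claim_equal_super_name : Prop := ∀ (name1 : String) (name2 : String), Dom_super_name name1 name2 → Spec_super_name name1 name2 (super_name name1 name2)

-- ===== LEMMAS AND PROOFS =====

-- the subtracting loop: getD drops by the count (twin of PySem.Dict.getD_foldl_insert_add_one)
theorem getD_foldl_insert_sub_one (l : List Char) (d : PySem.Dict Char Int) (v : Char) :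
    (l.foldl (fun d x => d.insert x (d.getD x 0 - 1)) d).getD v 0
      = d.getD v 0 - l.count v := by
  induction l generalizing d with
  | nil => simp
  | cons c t ih =>
    simp only [List.foldl_cons, ih, PySem.Dict.getD_insert, List.count_cons]
    by_cases h : v = c
    · simp only [h, beq_self_eq_true, if_true]
      push_cast; ring
    · simp [h]
      exact fun hh => h hh.symm

-- a 0-except-at-one-key sum over a Nodup key list
theorem sum_map_indicator (K : List Char) (c : Char) (v : Int)
    (hnd : K.Nodup) (hc : c ∈ K) :
    (K.map (fun k => if k = c then v else 0)).sum = v := by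
  induction K with
  | nil => cases hc
  | cons k t ih =>
    simp only [List.map_cons, List.sum_cons]
    rcases List.mem_cons.mp hc with heq | hct
    · subst heq
      have hz : (t.map (fun x => if x = c then v else 0)).sum = 0 := by
        rw [List.sum_eq_zero]
        intro y hy
        obtain ⟨x, hx, rfl⟩ := List.mem_map.mp hy
        have : x ≠ c := fun h => (List.nodup_cons.mp hnd).1 (h ▸ hx)
        simp [this]
      simp [hz]
    · have hk : k ≠ c := fun h => (List.nodup_cons.mp hnd).1 (h ▸ hct)
      simp [hk, ih (List.nodup_cons.mp hnd).2 hct]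

-- ord-weighted counts over a covering Nodup key list give the plain ASCII sum
theorem sum_weighted_count (K : List Char) (l : List Char)
    (hnd : K.Nodup) (hcov : ∀ c ∈ l, c ∈ K) :
    (K.map (fun k => (k.toNat : Int) * l.count k)).sum = pvAsciiSum l := by
  induction l with
  | nil => simp [pvAsciiSum]
  | cons c t ih =>
    have hc : c ∈ K := hcov c (List.mem_cons_self ..)
    have ht : ∀ x ∈ t, x ∈ K := fun x hx => hcov x (List.mem_cons_of_mem _ hx)
    have hsplit :
        (K.map (fun k => (k.toNat : Int) * (c :: t).count k)).sum
          = (K.map (fun k => (k.toNat : Int) * t.count k)).sum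
            + (K.map (fun k => if k = c then (c.toNat : Int) else 0)).sum := by
      have hpt : ∀ k ∈ K, (k.toNat : Int) * (c :: t).count k
          = (k.toNat : Int) * t.count k + (if k = c then (c.toNat : Int) else 0) := by
        intro k _
        simp only [List.count_cons]
        by_cases h : k = c
        · subst h; simp; ring
        · simp [h]
          exact Or.inl fun hh => h hh.symm
      rw [List.map_congr_left hpt, List.sum_map_add]
    have hA : pvAsciiSum (c :: t) = (c.toNat : Int) + pvAsciiSum t := by
      simp only [pvAsciiSum, List.foldl_cons]
      rw [PySem.List.foldl_add, PySem.List.foldl_add]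
      ring
    rw [hsplit, ih ht, sum_map_indicator K c _ hnd hc, hA]
    ring

-- B's weighted delta-dictionary sum equals A's difference of ASCII sums
theorem delta_sum_eq (l1 l2 : List Char) :
    (((l2.foldl (fun d c => d.insert c (d.getD c 0 - 1))
        (l1.foldl (fun d c => d.insert c (d.getD c 0 + 1))
          (PySem.Dict.empty (κ := Char) (ν := Int)))).items).map
      (fun p => (p.1.toNat : Int) * p.2)).sum
      = pvAsciiSum l1 - pvAsciiSum l2 := by
  set d1 := l1.foldl (fun d c => d.insert c (d.getD c 0 + 1))
    (PySem.Dict.empty (κ := Char) (ν := Int)) with hd1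
  set d2 := l2.foldl (fun d c => d.insert c (d.getD c 0 - 1)) d1 with hd2
  have hnd1 : d1.keys.Nodup := by
    rw [hd1]; exact PySem.Dict.nodup_keys_foldl_insert _ _ _ (by simp)
  have hnd2 : d2.keys.Nodup := by
    rw [hd2]; exact PySem.Dict.nodup_keys_foldl_insert _ _ _ hnd1
  have hk1 : d1.keys = PySem.Set.update (PySem.Dict.empty (κ := Char) (ν := Int)).keys l1 := by
    rw [hd1]; exact PySem.Dict.keys_foldl_insert _ _ _
  have hk2 : d2.keys = PySem.Set.update d1.keys l2 := by
    rw [hd2]; exact PySem.Dict.keys_foldl_insert _ _ _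
  have hcov : ∀ c, c ∈ l1 ∨ c ∈ l2 → c ∈ d2.keys := by
    intro c hc
    rw [hk2, PySem.Set.mem_update]
    rcases hc with h | h
    · left; rw [hk1, PySem.Set.mem_update]; right; exact h
    · right; exact h
  have hval : ∀ k, d2.getD k 0 = (l1.count k : Int) - (l2.count k : Int) := by
    intro k
    rw [hd2, getD_foldl_insert_sub_one, hd1, PySem.Dict.getD_foldl_insert_add_one]
    simp
  rw [PySem.Dict.items_eq_map_keys d2 hnd2 0, List.map_map]
  have : ((fun p : Char × Int => (p.1.toNat : Int) * p.2) ∘ fun k => (k, d2.getD k 0))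
      = fun k => (k.toNat : Int) * ((l1.count k : Int) - (l2.count k : Int)) := by
    funext k; simp [hval k]
  rw [this]
  have hsub :
      (d2.keys.map (fun k => (k.toNat : Int) * ((l1.count k : Int) - (l2.count k : Int)))).sum
        = (d2.keys.map (fun k => (k.toNat : Int) * l1.count k)).sum
          - (d2.keys.map (fun k => (k.toNat : Int) * l2.count k)).sum := by
    rw [eq_sub_iff_add_eq, ← List.sum_map_add]
    exact congrArg List.sum (List.map_congr_left (fun k _ => by ring))
  rw [hsub,
    sum_weighted_count d2.keys l1 hnd2 (fun c hc => hcov c (Or.inl hc)),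
    sum_weighted_count d2.keys l2 hnd2 (fun c hc => hcov c (Or.inr hc))]

-- ===== VERDICT (by name: the statement is the Claim_ definition above) =====
theorem super_name_spec : Claim_equal_super_name := by
  intro name1 name2 _
  unfold Spec_super_name super_name super_name_alt
  by_cases h : PySem.Str.len name1 = PySem.Str.len name2
  · simp only [h, if_true, ne_eq, not_true_eq_false, if_false]
    rw [delta_sum_eq]
    set s1 := pvAsciiSum name1.toList
    set s2 := pvAsciiSum name2.toList
    by_cases h1 : s1 > s2
    · have hp : s1 - s2 > 0 := by omega
      simp [h1]
    · by_cases h2 : s2 > s1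
      · have hp : ¬ s1 - s2 > 0 := by omega
        have hn : s1 - s2 < 0 := by omega
        simp [h1, h2, hn]
      · have hp : ¬ s1 - s2 > 0 := by omega
        have hn : ¬ s1 - s2 < 0 := by omega
        simp [h1, h2, hn]
  · have h' : name1.length ≠ name2.length := by simpa using h
    simp [h']
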